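-- pv_equiv track=rewrite | github.com/FlorenciaCorrea/lexer | lexer.py | a_operadores
-- ===== SOURCE A (Python) =====
-- def a_operadores(word):
-- 	s = 0
-- 	operadores = ['+','*']
-- 	for c in word:
-- 		if s == 0 and (c in operadores):
-- 			s = 1
-- 		else:
-- 			s = -1
-- 			break
-- 	return s == 1
-- ===== SOURCE B (Python) =====
-- def a_operadores(word):
-- 	chars = list(word)
-- 	return len(chars) == 1 and chars[0] in ('+', '*')
-- ===== Notes on version B (the rewrite author's own statement) =====
-- stated objective: simpler
-- what changed: Replaces the state-machine loop (running state s with break) by a direct structural predicate: materialize the characters once and test length == 1 and membership of the single char in ('+','*').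
import Mathlib
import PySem

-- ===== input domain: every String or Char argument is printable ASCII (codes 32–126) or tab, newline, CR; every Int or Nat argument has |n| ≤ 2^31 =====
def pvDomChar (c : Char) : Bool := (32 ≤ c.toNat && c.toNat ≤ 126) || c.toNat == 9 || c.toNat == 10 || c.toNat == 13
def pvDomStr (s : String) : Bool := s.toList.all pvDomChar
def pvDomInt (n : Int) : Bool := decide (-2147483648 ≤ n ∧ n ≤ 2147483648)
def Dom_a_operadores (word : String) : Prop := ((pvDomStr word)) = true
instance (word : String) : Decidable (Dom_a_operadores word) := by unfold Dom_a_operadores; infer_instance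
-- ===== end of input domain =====

-- B replaces A's state-machine loop by a direct length==1 + membership predicate (simpler).


-- ===== PORT A =====
-- the 'for c in word' loop with state s and break
def a_operadoresLoop (s : Int) (cs : List Char) : Int :=
  match cs with
  | [] => s
  | c :: rest =>
      if s == 0 && (c == '+' || c == '*') then a_operadoresLoop 1 rest
      else -1

def a_operadores (word : String) : Bool :=
  a_operadoresLoop 0 word.toList == 1

-- ===== PORT B =====
def a_operadores_alt (word : String) : Bool :=
  let chars := word.toList
  if chars.length == 1 then (chars.headD ' ' == '+' || chars.headD ' ' == '*')
  else false

-- ===== PRECONDITION & SPEC =====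
def Spec_a_operadores (word : String) (out : Bool) : Prop := out = a_operadores_alt word
instance (word : String) (out : Bool) : Decidable (Spec_a_operadores word out) := by unfold Spec_a_operadores; infer_instance

-- ===== CLAIM (what is proved, stated in full; the proofs are below) =====
def Claim_equal_a_operadores : Prop := ∀ (word : String), Dom_a_operadores word → Spec_a_operadores word (a_operadores word)

-- ===== LEMMAS AND PROOFS =====
-- ===== VERDICT (by name: the statement is the Claim_ definition above) =====
theorem a_operadores_spec : Claim_equal_a_operadores := by
  intro word _
  unfold Spec_a_operadores a_operadores a_operadores_alt
  cases h : word.toList with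
  | nil => simp [a_operadoresLoop]
  | cons c rest =>
    cases rest with
    | nil =>
      by_cases hc : c = '+' ∨ c = '*'
      · rcases hc with hc | hc <;> subst hc <;> simp [a_operadoresLoop]
      · push Not at hc
        simp [a_operadoresLoop, hc.1, hc.2]
    | cons d rest' =>
      by_cases hc : (c == '+' || c == '*') = true
      · simp [a_operadoresLoop, hc]
      · simp [a_operadoresLoop, hc]
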